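-- pv_equiv track=rewrite | github.com/joaquimscosta/docs-health-action | scripts/cross_doc_checker.py | find_overlapping_pairs
-- ===== SOURCE A (Python) =====
-- from itertools import combinations
-- from typing import Any, Dict, List, Optional, Set, Tuple
--
-- def find_overlapping_pairs(
--     doc_topics: Dict[str, Dict[str, int]],
-- ) -> List[Tuple[str, str, Set[str]]]:
--     """Find document pairs with overlapping topics.
--
--     Args:
--         doc_topics: Mapping of doc_path → {topic → line}.
--
--     Returns:
--         List of (doc_a, doc_b, shared_topics) tuples.
--     """
--     pairs: List[Tuple[str, str, Set[str]]] = []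
--     doc_keys = sorted(doc_topics.keys())
--     for a, b in combinations(doc_keys, 2):
--         shared = set(doc_topics[a].keys()) & set(doc_topics[b].keys())
--         if shared:
--             pairs.append((a, b, shared))
--     return pairs
-- ===== SOURCE B (Python) =====
-- def find_overlapping_pairs(doc_topics):
--     """Inverted index topic -> docs, then accumulate shared topics per co-occurring pair."""
--     doc_keys = sorted(doc_topics.keys())
--     index = {}
--     for doc in doc_keys:
--         for topic in doc_topics[doc]:
--             index.setdefault(topic, []).append(doc)
--     pairs = []
--     for a in doc_keys:
--         buckets = {}
--         for topic in doc_topics[a]: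
--             for b in index[topic]:
--                 if b > a:
--                     buckets.setdefault(b, set()).add(topic)
--         for b in sorted(buckets):
--             pairs.append((a, b, buckets[b]))
--     return pairs
-- ===== Notes on version B (the rewrite author's own statement) =====
-- stated objective: faster
-- what changed: Replaces A's O(D^2) loop over all document pairs with per-pair set intersections by an inverted index topic->documents from which shared topics are accumulated into per-document buckets, so only co-occurring pairs are ever touched.
import Mathlib
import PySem

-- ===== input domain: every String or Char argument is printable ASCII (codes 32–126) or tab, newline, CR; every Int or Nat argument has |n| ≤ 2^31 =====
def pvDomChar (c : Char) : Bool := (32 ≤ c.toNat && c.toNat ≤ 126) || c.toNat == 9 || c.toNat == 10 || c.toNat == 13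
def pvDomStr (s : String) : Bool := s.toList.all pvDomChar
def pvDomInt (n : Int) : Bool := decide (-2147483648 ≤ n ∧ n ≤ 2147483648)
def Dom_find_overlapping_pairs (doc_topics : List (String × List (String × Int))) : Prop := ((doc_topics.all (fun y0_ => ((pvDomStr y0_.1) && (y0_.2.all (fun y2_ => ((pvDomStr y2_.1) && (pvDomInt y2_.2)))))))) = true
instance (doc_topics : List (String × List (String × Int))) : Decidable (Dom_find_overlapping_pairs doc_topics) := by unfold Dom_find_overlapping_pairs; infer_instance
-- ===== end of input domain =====

-- B replaces A's all-pairs set intersections by an inverted index topic→docs plus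
-- per-document buckets of shared topics (objective: faster on sparse topic overlap).

-- ===== PORT A =====
def find_overlapping_pairs (doc_topics : List (String × List (String × Int))) : List (String × String × List String) :=
  let d : PySem.Dict String (List (String × Int)) := PySem.Dict.mk doc_topics
  let doc_keys := PySem.List.sorted d.keys (fun k => k) false
  (PySem.List.combinations doc_keys 2).foldl
    (fun pairs c =>
      match c with
      | [a, b] =>
        let shared := PySem.Set.inter (PySem.Set.ofList ((d.getD a []).map (fun p => p.1)))
                                      (PySem.Set.ofList ((d.getD b []).map (fun p => p.1)))
        if shared ≠ [] then pairs ++ [(a, b, shared)] else pairs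
      | _ => pairs)
    []

-- ===== PORT B =====
def find_overlapping_pairs_alt (doc_topics : List (String × List (String × Int))) : List (String × String × List String) :=
  let d : PySem.Dict String (List (String × Int)) := PySem.Dict.mk doc_topics
  let doc_keys := PySem.List.sorted d.keys (fun k => k) false
  let index : PySem.Dict String (List String) :=
    doc_keys.foldl (fun idx doc =>
      (d.getD doc []).foldl (fun idx tp => idx.modify tp.1 [] (fun ds => ds ++ [doc])) idx)
      PySem.Dict.empty
  doc_keys.foldl (fun pairs a =>
    let buckets : PySem.Dict String (PySem.Set String) :=
      (d.getD a []).foldl (fun bk tp =>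
        (index.getD tp.1 []).foldl (fun bk b =>
          if a < b then bk.modify b PySem.Set.empty (fun s => s.add tp.1) else bk) bk)
        PySem.Dict.empty
    (PySem.List.sorted buckets.keys (fun k => k) false).foldl
      (fun pairs b => pairs ++ [(a, b, buckets.getD b PySem.Set.empty)]) pairs)
    []

-- ===== PRECONDITION & SPEC =====
-- Pre_ excludes association lists with duplicate document keys: a Python dict cannot
-- contain them, so their assoc-list encoding is ambiguous and A's behaviour there is
-- an accident of how the dict was rebuilt (first- vs last-value).
def Pre_find_overlapping_pairs (doc_topics : List (String × List (String × Int))) : Prop :=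
  (doc_topics.map (fun p => p.1)).Nodup
instance (doc_topics : List (String × List (String × Int))) : Decidable (Pre_find_overlapping_pairs doc_topics) := by unfold Pre_find_overlapping_pairs; infer_instance
def pvWitness_find_overlapping_pairs : (List (String × List (String × Int))) :=
  [("a.md", [("t", 1), ("u", 2)]), ("b.md", [("t", 3)])]

def Spec_find_overlapping_pairs (doc_topics : List (String × List (String × Int))) (out : List (String × String × List String)) : Prop := out = find_overlapping_pairs_alt doc_topics
instance (doc_topics : List (String × List (String × Int))) (out : List (String × String × List String)) : Decidable (Spec_find_overlapping_pairs doc_topics out) := by unfold Spec_find_overlapping_pairs; infer_instance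

-- ===== CLAIM (what is proved, stated in full; the proofs are below) =====
def Claim_equal_find_overlapping_pairs : Prop := ∀ (doc_topics : List (String × List (String × Int))), Dom_find_overlapping_pairs doc_topics → Pre_find_overlapping_pairs doc_topics → Spec_find_overlapping_pairs doc_topics (find_overlapping_pairs doc_topics)

-- ===== LEMMAS AND PROOFS =====

theorem pv_ofList_append_singleton (l : List String) (x : String) :
    PySem.Set.ofList (l ++ [x]) = PySem.Set.add (PySem.Set.ofList l) x := by
  simp [PySem.Set.ofList]

theorem pv_filter_add (s : PySem.Set String) (x : String) (q : String → Bool) :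
    List.filter q (PySem.Set.add s x) =
      if q x then PySem.Set.add (List.filter q s) x else List.filter q s := by
  by_cases hx : x ∈ s
  · rw [PySem.Set.add_of_mem (x := x) hx]
    by_cases hq : q x = true
    · rw [if_pos hq, PySem.Set.add_of_mem (x := x)]
      exact List.mem_filter.mpr ⟨hx, hq⟩
    · simp [hq]
  · rw [PySem.Set.add_of_not_mem (x := x) hx, List.filter_append]
    by_cases hq : q x = true
    · rw [if_pos hq, PySem.Set.add_of_not_mem (x := x)]
      · simp [hq]
      · intro h; exact hx (List.mem_of_mem_filter h)
    · simp [hq]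

theorem pv_filter_ofList (l : List String) (q : String → Bool) :
    List.filter q (PySem.Set.ofList l) = PySem.Set.ofList (l.filter q) := by
  induction l using List.reverseRecOn with
  | nil => rfl
  | append_singleton l x ih =>
    rw [pv_ofList_append_singleton, pv_filter_add, List.filter_append, ih]
    by_cases hq : q x = true
    · simp only [hq, if_true]
      have h2 : List.filter q [x] = [x] := by simp [hq]
      rw [h2, pv_ofList_append_singleton]
    · have h2 : List.filter q [x] = [] := by simp [hq]
      simp [hq, h2]

def pvT (d : PySem.Dict String (List (String × Int))) (doc : String) : List String :=
  (d.getD doc []).map (fun p => p.1)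

def pvSh (d : PySem.Dict String (List (String × Int))) (a b : String) : List String :=
  PySem.Set.inter (PySem.Set.ofList (pvT d a)) (PySem.Set.ofList (pvT d b))

def pvIdx (d : PySem.Dict String (List (String × Int))) (ks : List String) :
    PySem.Dict String (List String) :=
  ks.foldl (fun idx doc =>
    (d.getD doc []).foldl (fun idx tp => idx.modify tp.1 [] (fun ds => ds ++ [doc])) idx)
    PySem.Dict.empty

-- inner index loop: getD after folding one document's topics
theorem pv_idx_inner (d : PySem.Dict String (List (String × Int))) (doc : String)
    (idx : PySem.Dict String (List String)) (t : String) :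
    ((d.getD doc []).foldl (fun idx tp => idx.modify tp.1 [] (fun ds => ds ++ [doc])) idx).getD t []
      = idx.getD t [] ++ (((d.getD doc []).map (fun tp => (tp.1, doc))).filter (fun p => p.1 == t)).map (fun p => p.2) := by
  rw [← PySem.Dict.getD_foldl_modify_append (((d.getD doc []).map (fun tp => (tp.1, doc)))) idx t]
  rw [List.foldl_map]

theorem pv_mem_idx_inner (d : PySem.Dict String (List (String × Int))) (doc : String)
    (idx : PySem.Dict String (List String)) (t b : String) :
    b ∈ ((d.getD doc []).foldl (fun idx tp => idx.modify tp.1 [] (fun ds => ds ++ [doc])) idx).getD t []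
      ↔ b ∈ idx.getD t [] ∨ (b = doc ∧ t ∈ pvT d doc) := by
  rw [pv_idx_inner, List.mem_append]
  constructor
  · rintro (h | h)
    · exact Or.inl h
    · obtain ⟨p, hp, hb⟩ := List.mem_map.mp h
      obtain ⟨hpmem, hpt⟩ := List.mem_filter.mp hp
      obtain ⟨tp, htp, rfl⟩ := List.mem_map.mp hpmem
      refine Or.inr ⟨hb.symm, ?_⟩
      simp only [beq_iff_eq] at hpt
      subst hpt
      exact List.mem_map.mpr ⟨tp, htp, rfl⟩
  · rintro (h | ⟨rfl, ht⟩)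
    · exact Or.inl h
    · right
      obtain ⟨tp, htp, rfl⟩ := List.mem_map.mp ht
      refine List.mem_map.mpr ⟨(tp.1, b), List.mem_filter.mpr ⟨List.mem_map.mpr ⟨tp, htp, rfl⟩, by simp⟩, rfl⟩

theorem pv_mem_idx (d : PySem.Dict String (List (String × Int))) (ks : List String)
    (t b : String) :
    b ∈ (pvIdx d ks).getD t [] ↔ b ∈ ks ∧ t ∈ pvT d b := by
  suffices h : ∀ (l : List String) (idx : PySem.Dict String (List String)),
      b ∈ (l.foldl (fun idx doc =>
        (d.getD doc []).foldl (fun idx tp => idx.modify tp.1 [] (fun ds => ds ++ [doc])) idx) idx).getD t []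
      ↔ b ∈ idx.getD t [] ∨ (b ∈ l ∧ t ∈ pvT d b) by
    rw [pvIdx, h]
    simp [PySem.Dict.getD_empty]
  intro l
  induction l with
  | nil => simp
  | cons doc rest ih =>
    intro idx
    rw [List.foldl_cons, ih, pv_mem_idx_inner]
    constructor
    · rintro ((h | ⟨rfl, ht⟩) | ⟨hb, ht⟩)
      · exact Or.inl h
      · exact Or.inr ⟨List.mem_cons_self, ht⟩
      · exact Or.inr ⟨List.mem_cons_of_mem _ hb, ht⟩
    · rintro (h | ⟨hb, ht⟩)
      · exact Or.inl (Or.inl h)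
      · rcases List.mem_cons.mp hb with rfl | hb
        · exact Or.inl (Or.inr ⟨rfl, ht⟩)
        · exact Or.inr ⟨hb, ht⟩

def pvBk (d : PySem.Dict String (List (String × Int))) (idx : PySem.Dict String (List String))
    (a : String) : PySem.Dict String (PySem.Set String) :=
  (d.getD a []).foldl (fun bk tp =>
    (idx.getD tp.1 []).foldl (fun bk b =>
      if a < b then bk.modify b PySem.Set.empty (fun s => s.add tp.1) else bk) bk)
    PySem.Dict.empty

-- one topic's inner loop: effect on the bucket at b
theorem pv_bk_inner_getD (a t' : String) (lst : List String)
    (bk : PySem.Dict String (PySem.Set String)) (b : String) :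
    ((lst.foldl (fun bk b' =>
        if a < b' then bk.modify b' PySem.Set.empty (fun s => s.add t') else bk) bk).getD b PySem.Set.empty)
      = if a < b ∧ b ∈ lst then PySem.Set.add (bk.getD b PySem.Set.empty) t'
        else bk.getD b PySem.Set.empty := by
  induction lst generalizing bk with
  | nil => simp
  | cons b' rest ih =>
    rw [List.foldl_cons, ih]
    by_cases hb' : a < b'
    · rw [if_pos hb']
      by_cases hbb : b = b'
      · subst hbb
        have hcons : a < b ∧ b ∈ b :: rest := ⟨hb', by simp⟩
        by_cases hmem : a < b ∧ b ∈ rest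
        · rw [if_pos hmem, PySem.Dict.getD_modify, if_pos rfl, if_pos hcons,
            PySem.Set.add_of_mem (x := t') ((PySem.Set.mem_add _ _ _).mpr (Or.inr rfl))]
        · rw [if_neg hmem, PySem.Dict.getD_modify, if_pos rfl, if_pos hcons]
      · rw [PySem.Dict.getD_modify, if_neg hbb]
        by_cases hmem : a < b ∧ b ∈ rest
        · rw [if_pos hmem, if_pos ⟨hmem.1, List.mem_cons_of_mem _ hmem.2⟩]
        · rw [if_neg hmem, if_neg]
          rintro ⟨hab, hmem'⟩
          rcases List.mem_cons.mp hmem' with rfl | h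
          · exact hbb rfl
          · exact hmem ⟨hab, h⟩
    · rw [if_neg hb']
      by_cases hmem : a < b ∧ b ∈ rest
      · rw [if_pos hmem, if_pos ⟨hmem.1, List.mem_cons_of_mem _ hmem.2⟩]
      · rw [if_neg hmem, if_neg]
        rintro ⟨hab, hmem'⟩
        rcases List.mem_cons.mp hmem' with rfl | h
        · exact hb' hab
        · exact hmem ⟨hab, h⟩

theorem pv_bk_getD (d : PySem.Dict String (List (String × Int)))
    (idx : PySem.Dict String (List String)) (a b : String) :
    (pvBk d idx a).getD b PySem.Set.empty
      = PySem.Set.ofList (((d.getD a []).map (fun p => p.1)).filter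
          (fun t' => decide (a < b) && decide (b ∈ idx.getD t' []))) := by
  suffices h : ∀ (tps : List (String × Int)) (bk : PySem.Dict String (PySem.Set String)),
      ((tps.foldl (fun bk tp =>
        (idx.getD tp.1 []).foldl (fun bk b' =>
          if a < b' then bk.modify b' PySem.Set.empty (fun s => s.add tp.1) else bk) bk) bk).getD b PySem.Set.empty)
      = PySem.Set.update (bk.getD b PySem.Set.empty)
          ((tps.map (fun p => p.1)).filter (fun t' => decide (a < b) && decide (b ∈ idx.getD t' []))) by
    rw [pvBk, h]
    rfl
  intro tps
  induction tps with
  | nil => simp [PySem.Set.update]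
  | cons tp rest ih =>
    intro bk
    rw [List.foldl_cons, ih, pv_bk_inner_getD]
    by_cases hc : a < b ∧ b ∈ idx.getD tp.1 []
    · rw [if_pos hc]
      have : ((tp.1 :: rest.map (fun p => p.1)).filter
          (fun t' => decide (a < b) && decide (b ∈ idx.getD t' []))) =
          tp.1 :: (rest.map (fun p => p.1)).filter (fun t' => decide (a < b) && decide (b ∈ idx.getD t' [])) := by
        rw [List.filter_cons, if_pos (by simp [hc.1, hc.2])]
      simp only [List.map_cons, this]
      rfl
    · rw [if_neg hc]
      have : ((tp.1 :: rest.map (fun p => p.1)).filter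
          (fun t' => decide (a < b) && decide (b ∈ idx.getD t' []))) =
          (rest.map (fun p => p.1)).filter (fun t' => decide (a < b) && decide (b ∈ idx.getD t' [])) := by
        rw [List.filter_cons, if_neg (by simpa using hc)]
      simp only [List.map_cons, this]

theorem pv_nodup_keys_modify {ν : Type} (d : PySem.Dict String ν) (k : String) (d0 : ν)
    (f : ν → ν) (h : d.keys.Nodup) : (d.modify k d0 f).keys.Nodup := by
  rw [PySem.Dict.keys_modify]
  by_cases hc : d.contains k = true
  · rw [PySem.Dict.keys_insert_of_contains _ _ hc]; exact h
  · have hc' : d.contains k = false := by simpa using hc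
    rw [PySem.Dict.keys_insert_of_not_contains _ _ hc']
    refine List.Nodup.append h (List.nodup_singleton k) ?_
    intro x hx hx'
    rcases List.mem_singleton.mp hx' with rfl
    exact hc ((PySem.Dict.contains_iff_mem_keys _ _).mpr hx)

def pvBkStep (idx : PySem.Dict String (List String)) (a : String)
    (bk : PySem.Dict String (PySem.Set String)) (tp : String × Int) :
    PySem.Dict String (PySem.Set String) :=
  (idx.getD tp.1 []).foldl (fun bk b =>
    if a < b then bk.modify b PySem.Set.empty (fun s => s.add tp.1) else bk) bk

theorem pv_bk_inner_contains (a t' : String) (lst : List String)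
    (bk : PySem.Dict String (PySem.Set String)) (b : String) :
    ((lst.foldl (fun bk b' =>
        if a < b' then bk.modify b' PySem.Set.empty (fun s => s.add t') else bk) bk).contains b)
      = if a < b ∧ b ∈ lst then true else bk.contains b := by
  induction lst generalizing bk with
  | nil => simp
  | cons b' rest ih =>
    rw [List.foldl_cons, ih]
    by_cases hb' : a < b'
    · rw [if_pos hb']
      by_cases hbb : b = b'
      · subst hbb
        have hcons : a < b ∧ b ∈ b :: rest := ⟨hb', by simp⟩
        by_cases hmem : a < b ∧ b ∈ rest
        · rw [if_pos hmem, if_pos hcons]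
        · rw [if_neg hmem, if_pos hcons, PySem.Dict.contains_modify]
          simp
      · rw [PySem.Dict.contains_modify]
        have hbe : (b == b') = false := by simpa using hbb
        rw [hbe, Bool.false_or]
        by_cases hmem : a < b ∧ b ∈ rest
        · rw [if_pos hmem, if_pos ⟨hmem.1, List.mem_cons_of_mem _ hmem.2⟩]
        · rw [if_neg hmem, if_neg]
          rintro ⟨hab, hmem'⟩
          rcases List.mem_cons.mp hmem' with rfl | h
          · exact hbb rfl
          · exact hmem ⟨hab, h⟩
    · rw [if_neg hb']
      by_cases hmem : a < b ∧ b ∈ rest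
      · rw [if_pos hmem, if_pos ⟨hmem.1, List.mem_cons_of_mem _ hmem.2⟩]
      · rw [if_neg hmem, if_neg]
        rintro ⟨hab, hmem'⟩
        rcases List.mem_cons.mp hmem' with rfl | h
        · exact hb' hab
        · exact hmem ⟨hab, h⟩

theorem pv_bk_contains_any (idx : PySem.Dict String (List String)) (a b : String)
    (tps : List (String × Int)) (bk : PySem.Dict String (PySem.Set String)) :
    ((tps.foldl (pvBkStep idx a) bk).contains b)
      = (bk.contains b || tps.any (fun tp => decide (a < b) && decide (b ∈ idx.getD tp.1 []))) := by
  induction tps generalizing bk with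
  | nil => simp
  | cons tp rest ih =>
    rw [List.foldl_cons, ih]
    rw [show pvBkStep idx a bk tp = (idx.getD tp.1 []).foldl (fun bk b' =>
      if a < b' then bk.modify b' PySem.Set.empty (fun s => s.add tp.1) else bk) bk from rfl]
    rw [pv_bk_inner_contains]
    by_cases hhead : a < b ∧ b ∈ idx.getD tp.1 []
    · rw [if_pos hhead]
      simp [hhead.1, hhead.2]
    · rw [if_neg hhead]
      rcases not_and_or.mp hhead with h | h <;> simp [List.any_cons, h]

theorem pv_bk_mem_keys (d : PySem.Dict String (List (String × Int)))
    (idx : PySem.Dict String (List String)) (a b : String) :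
    b ∈ ((d.getD a []).foldl (pvBkStep idx a) PySem.Dict.empty).keys
      ↔ a < b ∧ ∃ t' ∈ (d.getD a []).map (fun p => p.1), b ∈ idx.getD t' [] := by
  rw [← PySem.Dict.contains_iff_mem_keys, pv_bk_contains_any]
  simp only [PySem.Dict.contains_empty, Bool.false_or, List.any_eq_true, Bool.and_eq_true,
    decide_eq_true_eq, List.mem_map]
  constructor
  · rintro ⟨tp, htp, hab, hb⟩
    exact ⟨hab, tp.1, ⟨tp, htp, rfl⟩, hb⟩
  · rintro ⟨hab, t', ⟨tp, htp, rfl⟩, hb⟩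
    exact ⟨tp, htp, hab, hb⟩

theorem pv_bk_keys_nodup (d : PySem.Dict String (List (String × Int)))
    (idx : PySem.Dict String (List String)) (a : String) :
    ((d.getD a []).foldl (pvBkStep idx a) PySem.Dict.empty).keys.Nodup := by
  suffices h : ∀ (tps : List (String × Int)) (bk : PySem.Dict String (PySem.Set String)),
      bk.keys.Nodup → (tps.foldl (pvBkStep idx a) bk).keys.Nodup by
    exact h _ _ (by simp [PySem.Dict.keys_empty])
  intro tps
  induction tps with
  | nil => intro bk h; simpa using h
  | cons tp rest ih =>
    intro bk h
    rw [List.foldl_cons]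
    refine ih _ ?_
    rw [show pvBkStep idx a bk tp = (idx.getD tp.1 []).foldl (fun bk b' =>
      if a < b' then bk.modify b' PySem.Set.empty (fun s => s.add tp.1) else bk) bk from rfl]
    generalize idx.getD tp.1 [] = lst
    induction lst generalizing bk with
    | nil => simpa using h
    | cons b' rest' ih' =>
      rw [List.foldl_cons]
      refine ih' _ ?_
      by_cases hb' : a < b'
      · rw [if_pos hb']; exact pv_nodup_keys_modify _ _ _ _ h
      · rw [if_neg hb']; exact h

def pvStepA (d : PySem.Dict String (List (String × Int)))
    (pairs : List (String × String × List String)) (c : List String) :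
    List (String × String × List String) :=
  match c with
  | [a, b] =>
    let shared := PySem.Set.inter (PySem.Set.ofList ((d.getD a []).map (fun p => p.1)))
                                  (PySem.Set.ofList ((d.getD b []).map (fun p => p.1)))
    if shared ≠ [] then pairs ++ [(a, b, shared)] else pairs
  | _ => pairs

def pvSpecA (d : PySem.Dict String (List (String × Int))) :
    List String → List (String × String × List String)
  | [] => []
  | a :: t => ((t.filter (fun b => decide (pvSh d a b ≠ []))).map (fun b => (a, b, pvSh d a b)))
      ++ pvSpecA d t

theorem pv_specA_inner (d : PySem.Dict String (List (String × Int))) (a : String)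
    (t : List String) (acc : List (String × String × List String)) :
    t.foldl (fun acc b => pvStepA d acc [a, b]) acc
      = acc ++ (t.filter (fun b => decide (pvSh d a b ≠ []))).map (fun b => (a, b, pvSh d a b)) := by
  induction t generalizing acc with
  | nil => simp
  | cons b rest ih =>
    rw [List.foldl_cons, ih, List.filter_cons]
    show (if pvSh d a b ≠ [] then acc ++ [(a, b, pvSh d a b)] else acc) ++ _ = _
    by_cases h : pvSh d a b ≠ []
    · rw [if_pos h, if_pos (by simpa using h)]
      simp
    · rw [if_neg h, if_neg (by simpa using h)]

theorem pv_foldA (d : PySem.Dict String (List (String × Int))) (l : List String)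
    (acc : List (String × String × List String)) :
    (PySem.List.combinations l 2).foldl (pvStepA d) acc = acc ++ pvSpecA d l := by
  induction l generalizing acc with
  | nil => simp [PySem.List.combinations, pvSpecA]
  | cons a t ih =>
    rw [show (2 : Nat) = 1 + 1 from rfl, PySem.List.combinations_cons_succ,
      List.foldl_append, PySem.List.combinations_one, List.map_map]
    rw [List.foldl_map]
    have hcomp : (fun (x : List (String × String × List String)) (y : String) =>
        pvStepA d x (((fun c => a :: c) ∘ fun x => [x]) y))
        = fun acc b => pvStepA d acc [a, b] := rfl
    rw [hcomp, pv_specA_inner, ih, pvSpecA]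
    simp

-- B outer fold decomposition
theorem pv_foldB (d : PySem.Dict String (List (String × Int)))
    (idx : PySem.Dict String (List String)) (l : List String)
    (acc : List (String × String × List String)) :
    l.foldl (fun pairs a =>
        let buckets := (d.getD a []).foldl (fun bk tp =>
          (idx.getD tp.1 []).foldl (fun bk b =>
            if a < b then bk.modify b PySem.Set.empty (fun s => s.add tp.1) else bk) bk)
          PySem.Dict.empty
        (PySem.List.sorted buckets.keys (fun k => k) false).foldl
          (fun pairs b => pairs ++ [(a, b, buckets.getD b PySem.Set.empty)]) pairs) acc
      = acc ++ l.flatMap (fun a =>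
          let buckets := (d.getD a []).foldl (fun bk tp =>
            (idx.getD tp.1 []).foldl (fun bk b =>
              if a < b then bk.modify b PySem.Set.empty (fun s => s.add tp.1) else bk) bk)
            PySem.Dict.empty
          (PySem.List.sorted buckets.keys (fun k => k) false).map
            (fun b => (a, b, buckets.getD b PySem.Set.empty))) := by
  induction l generalizing acc with
  | nil => simp
  | cons a t ih =>
    rw [List.foldl_cons, List.flatMap_cons]
    rw [PySem.List.foldl_append_singleton_eq_map, ih]
    simp

theorem pv_sh_ne_nil (d : PySem.Dict String (List (String × Int))) (a b : String) :
    pvSh d a b ≠ [] ↔ ∃ t' ∈ pvT d a, t' ∈ pvT d b := by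
  rw [pvSh, PySem.Set.inter]
  rw [Ne, List.filter_eq_nil_iff]
  push Not
  constructor
  · rintro ⟨x, hx, hc⟩
    exact ⟨x, (PySem.Set.mem_ofList _ _).mp hx,
      (PySem.Set.mem_ofList _ _).mp ((PySem.Set.contains_iff _ _).mp (by simpa using hc))⟩
  · rintro ⟨x, hxa, hxb⟩
    exact ⟨x, (PySem.Set.mem_ofList _ _).mpr hxa,
      by simpa using (PySem.Set.contains_iff _ _).mpr ((PySem.Set.mem_ofList _ _).mpr hxb)⟩

theorem pv_sh_eq_filter (d : PySem.Dict String (List (String × Int))) (a b : String) :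
    pvSh d a b = PySem.Set.ofList ((pvT d a).filter (fun t' => decide (t' ∈ pvT d b))) := by
  rw [pvSh, PySem.Set.inter, pv_filter_ofList]
  congr 1
  apply List.filter_congr
  intro x _
  rw [PySem.Set.contains_eq_listContains]
  simp [PySem.Set.mem_ofList]

theorem pv_mem_tail (pre t : List String) (a b : String)
    (hlt : (pre ++ a :: t).Pairwise (· < ·)) :
    (b ∈ pre ++ a :: t ∧ a < b) ↔ b ∈ t := by
  rw [List.pairwise_append] at hlt
  obtain ⟨hpre, hcons, hcross⟩ := hlt
  rw [List.pairwise_cons] at hcons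
  constructor
  · rintro ⟨hmem, hab⟩
    rcases List.mem_append.mp hmem with h | h
    · exact absurd (lt_trans (hcross b h a (by simp)) hab) (lt_irrefl _)
    · rcases List.mem_cons.mp h with rfl | h
      · exact absurd hab (lt_irrefl _)
      · exact h
  · intro h
    exact ⟨List.mem_append.mpr (Or.inr (List.mem_cons_of_mem _ h)), hcons.1 b h⟩

-- the per-document block of B equals the per-document block of A's spec
theorem pv_block (d : PySem.Dict String (List (String × Int))) (ks pre t : List String)
    (a : String) (hks : ks = pre ++ a :: t) (hlt : ks.Pairwise (· < ·))
    (idx : PySem.Dict String (List String))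
    (hidx : ∀ t' b, b ∈ idx.getD t' [] ↔ b ∈ ks ∧ t' ∈ pvT d b) :
    (PySem.List.sorted ((d.getD a []).foldl (pvBkStep idx a) PySem.Dict.empty).keys
        (fun k => k) false).map
      (fun b => (a, b, ((d.getD a []).foldl (pvBkStep idx a) PySem.Dict.empty).getD b PySem.Set.empty))
      = (t.filter (fun b => decide (pvSh d a b ≠ []))).map (fun b => (a, b, pvSh d a b)) := by
  subst hks
  set buckets := (d.getD a []).foldl (pvBkStep idx a) PySem.Dict.empty with hbdef
  have ht_sub : t.Sublist (pre ++ a :: t) := by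
    refine List.sublist_append_of_sublist_right ?_
    exact (List.sublist_cons_self a t)
  have ht_lt : t.Pairwise (· < ·) := hlt.sublist ht_sub
  have hc_lt : (t.filter (fun b => decide (pvSh d a b ≠ []))).Pairwise (· < ·) :=
    ht_lt.sublist List.filter_sublist
  have hc_nd : (t.filter (fun b => decide (pvSh d a b ≠ []))).Nodup :=
    hc_lt.imp (fun h => ne_of_lt h)
  have hmemk : ∀ b, b ∈ buckets.keys ↔ (b ∈ pre ++ a :: t ∧ a < b) ∧ pvSh d a b ≠ [] := by
    intro b
    rw [hbdef, pv_bk_mem_keys]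
    constructor
    · rintro ⟨hab, t', ht', hb⟩
      have := (hidx t' b).mp hb
      exact ⟨⟨this.1, hab⟩, (pv_sh_ne_nil d a b).mpr ⟨t', ht', this.2⟩⟩
    · rintro ⟨⟨hmem, hab⟩, hsh⟩
      obtain ⟨t', ht', htb⟩ := (pv_sh_ne_nil d a b).mp hsh
      exact ⟨hab, t', ht', (hidx t' b).mpr ⟨hmem, htb⟩⟩
  have hperm : (t.filter (fun b => decide (pvSh d a b ≠ []))).Perm buckets.keys := by
    rw [List.perm_ext_iff_of_nodup hc_nd (pv_bk_keys_nodup d idx a)]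
    intro b
    rw [hmemk, List.mem_filter, pv_mem_tail pre t a b hlt]
    simp only [decide_eq_true_eq]
  rw [PySem.List.sorted_eq_of_perm_of_pairwise_lt _ _ _ hperm hc_lt]
  apply List.map_congr_left
  intro b hb
  obtain ⟨hbt, hshb⟩ := List.mem_filter.mp hb
  have hmem : b ∈ pre ++ a :: t ∧ a < b := (pv_mem_tail pre t a b hlt).mpr hbt
  have hval : buckets.getD b PySem.Set.empty = pvSh d a b := by
    have h1 : buckets.getD b PySem.Set.empty
        = PySem.Set.ofList ((pvT d a).filter
            (fun t' => decide (a < b) && decide (b ∈ idx.getD t' []))) :=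
      pv_bk_getD d idx a b
    rw [h1, pv_sh_eq_filter]
    congr 1
    apply List.filter_congr
    intro t' _
    have hbi : (b ∈ idx.getD t' []) ↔ (t' ∈ pvT d b) := by
      rw [hidx t' b]
      exact and_iff_right hmem.1
    simp [hmem.2, hbi]
  rw [hval]

theorem pv_main (d : PySem.Dict String (List (String × Int))) (ks : List String)
    (hlt : ks.Pairwise (· < ·)) (idx : PySem.Dict String (List String))
    (hidx : ∀ t' b, b ∈ idx.getD t' [] ↔ b ∈ ks ∧ t' ∈ pvT d b) :
    ∀ (post pre : List String), ks = pre ++ post →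
      post.flatMap (fun a =>
          let buckets := (d.getD a []).foldl (fun bk tp =>
            (idx.getD tp.1 []).foldl (fun bk b =>
              if a < b then bk.modify b PySem.Set.empty (fun s => s.add tp.1) else bk) bk)
            PySem.Dict.empty
          (PySem.List.sorted buckets.keys (fun k => k) false).map
            (fun b => (a, b, buckets.getD b PySem.Set.empty)))
        = pvSpecA d post := by
  intro post
  induction post with
  | nil => intro pre h; rfl
  | cons a t ih =>
    intro pre h
    rw [List.flatMap_cons, pvSpecA]
    have htail := ih (pre ++ [a]) (by rw [h, List.append_assoc]; rfl)
    rw [htail]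
    congr 1
    exact pv_block d ks pre t a h hlt idx hidx


theorem pv_final : ∀ (doc_topics : List (String × List (String × Int))),
    Pre_find_overlapping_pairs doc_topics →
    find_overlapping_pairs doc_topics = find_overlapping_pairs_alt doc_topics := by
  intro dt hpre
  have hA : find_overlapping_pairs dt
      = (PySem.List.combinations
          (PySem.List.sorted (PySem.Dict.mk dt).keys (fun k => k) false) 2).foldl
          (pvStepA (PySem.Dict.mk dt)) [] := rfl
  set d := PySem.Dict.mk dt with hd
  set ks := PySem.List.sorted d.keys (fun k => k) false with hks
  have hB : find_overlapping_pairs_alt dt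
      = ks.foldl (fun pairs a =>
          let buckets := (d.getD a []).foldl (fun bk tp =>
            ((pvIdx d ks).getD tp.1 []).foldl (fun bk b =>
              if a < b then bk.modify b PySem.Set.empty (fun s => s.add tp.1) else bk) bk)
            PySem.Dict.empty
          (PySem.List.sorted buckets.keys (fun k => k) false).foldl
            (fun pairs b => pairs ++ [(a, b, buckets.getD b PySem.Set.empty)]) pairs) [] := rfl
  have hnd : ks.Nodup := by
    have hperm := PySem.List.sorted_perm d.keys (fun k => k) false
    exact hperm.symm.nodup (by exact hpre)
  have hle : ks.Pairwise (fun x y => x ≤ y) := PySem.List.sorted_pairwise d.keys (fun k => k)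
  have hlt : ks.Pairwise (· < ·) := (hle.and hnd).imp (fun h => lt_of_le_of_ne h.1 h.2)
  have hidx : ∀ t' b, b ∈ (pvIdx d ks).getD t' [] ↔ b ∈ ks ∧ t' ∈ pvT d b :=
    fun t' b => pv_mem_idx d ks t' b
  rw [hA, hB, pv_foldA, pv_foldB, List.nil_append, List.nil_append]
  exact (pv_main d ks hlt (pvIdx d ks) hidx ks [] rfl).symm

-- ===== VERDICT (by name: the statement is the Claim_ definition above) =====
theorem find_overlapping_pairs_spec : Claim_equal_find_overlapping_pairs := by
  intro dt _hdom hpre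
  exact pv_final dt hpre
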